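-- pv_equiv track=rewrite | github.com/stankv/Studing | 22_SherlockValidString.py | SherlockValidString
-- ===== SOURCE A (Python) =====
-- def SherlockValidString(s):
--
--     S = []
--     si = []
--     si.append(s[0])
--     i = 1
--     si.append(i)
--     S.append(si)
--     si =[]
--     while(i < len(s)):
--         flag = False
--         for j in range(len(S)):
--             if s[i] == S[j][0]:
--                 S[j][1] += 1
--                 flag = True
--                 break
--         if flag:
--             i += 1
--             continue
--         si.append(s[i])
--         si.append(1)
--         S.append(si)
--         si = []
--         i += 1
--
--     # формируем массив - количества вхождений букв
--     L = []
--     for i in range(len(S)):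
--         L.append(S[i][1])
--
--     # проверяем равно ли количество вхождений для каждой из букв
--     for i in range(len(L)):
--         if L[i] == L[0]:
--             flag = True
--         else:
--             flag = False
--             break
--     if flag:
--         return flag
--     # если убрать одну букву - станет ли количество вхождений равным
--     for i in range(len(L)):
--         L1 = []
--         for j in range(len(L)):
--             L1.append(L[j])
--         L1[i] = L1[i] - 1
--         if L1[i] == 0:
--             L1.pop(i)
--         for j in range(len(L1)):
--             if L1[j] == L1[0]:
--                 flag = True
--             else:
--                 flag = False
--                 break
--         if flag:
--             return flag
--     return flag
-- ===== SOURCE B (Python) =====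
-- def SherlockValidString(s):
--     counts = {}
--     for c in s:
--         counts[c] = counts.get(c, 0) + 1
--     vals = list(counts.values())
--     m = min(vals)
--     M = max(vals)
--     if m == M:
--         return True
--     if M == m + 1 and vals.count(M) == 1:
--         return True
--     return m == 1 and vals.count(M) == len(vals) - 1
-- ===== Notes on version B (the rewrite author's own statement) =====
-- stated objective: faster
-- what changed: A builds per-char counts by scanning a list of [char,count] pairs for every character and then, for each distinct char, copies the whole count list and re-checks it; B counts with a dict in one pass and decides validity from min, max and count(max) of the count values in a single O(k) check, with no removal trials.
import Mathlib
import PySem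

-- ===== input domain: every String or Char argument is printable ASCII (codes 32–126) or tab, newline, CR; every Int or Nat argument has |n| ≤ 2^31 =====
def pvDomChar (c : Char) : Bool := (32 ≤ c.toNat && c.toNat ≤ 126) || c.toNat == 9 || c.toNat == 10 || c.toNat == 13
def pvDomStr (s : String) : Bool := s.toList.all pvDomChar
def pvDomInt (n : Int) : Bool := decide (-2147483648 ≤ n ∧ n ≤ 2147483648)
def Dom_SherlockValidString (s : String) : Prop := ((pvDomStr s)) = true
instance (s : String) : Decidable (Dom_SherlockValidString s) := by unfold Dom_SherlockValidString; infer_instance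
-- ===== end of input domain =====

-- B replaces A's list-scanning character counter and per-index copy/decrement/recheck trials
-- by a one-pass dict count followed by a single min/max/count(max) test (objective: faster).

-- ===== PORT A =====
-- inner 'for j in range(len(S)): if s[i] == S[j][0]: S[j][1] += 1; break' — none = no match (flag stays False)
def pvBumpA : List (Char × Int) → Char → Option (List (Char × Int))
  | [], _ => none
  | (a, n) :: rest, c =>
    if c == a then some ((a, n + 1) :: rest)
    else (pvBumpA rest c).map (fun r => (a, n) :: r)

-- the 'while (i < len(s))' loop over the remaining characters
def pvLoopA : List (Char × Int) → List Char → List (Char × Int)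
  | S, [] => S
  | S, c :: cs =>
    match pvBumpA S c with
    | some S' => pvLoopA S' cs
    | none => pvLoopA (S ++ [(c, 1)]) cs

-- 'for i in range(len(L)): flag = (L[i] == L[0])' with break on mismatch = all-equal-to-first
def pvAllEqA (L : List Int) : Bool := L.all (fun x => x == L.headD 0)

-- one trial: L1 = copy; L1[i] -= 1; if L1[i] == 0: L1.pop(i)   (i < len L in every call A makes)
def pvDecA (L : List Int) (i : Nat) : List Int :=
  let L1 := L.set i (L.getD i 0 - 1)
  if L1.getD i 0 == 0 then L1.eraseIdx i else L1

-- 'for i in range(len(L)): … if flag: return flag' ; after the loop 'return flag' (False)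
def pvTryA (L : List Int) : List Nat → Bool
  | [] => false
  | i :: is => if pvAllEqA (pvDecA L i) then true else pvTryA L is

def SherlockValidString (s : String) : Bool :=
  match s.toList with
  | [] => false   -- Python raises IndexError on s[0] here; excluded by Pre_
  | c :: cs =>
    let S := pvLoopA [(c, 1)] cs
    let L := S.map (·.2)
    if pvAllEqA L then true else pvTryA L (List.range L.length)

-- ===== PORT B =====
def SherlockValidString_alt (s : String) : Bool :=
  let counts := s.toList.foldl (fun d c => d.insert c (d.getD c 0 + 1))
    (PySem.Dict.empty : PySem.Dict Char Int)
  let vals := counts.values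
  match PySem.List.min? vals (fun x => x), PySem.List.max? vals (fun x => x) with
  | some m, some M =>
    if m == M then true
    else if M == m + 1 && (vals.count M : Int) == 1 then true
    else m == 1 && (vals.count M : Int) == (vals.length : Int) - 1
  | _, _ => false   -- vals empty: Python's min([]) raises ValueError; excluded by Pre_

-- ===== PRECONDITION & SPEC =====
-- Pre_ excludes exactly the empty string, on which A raises IndexError (B's min([]) raises too).
def Pre_SherlockValidString (s : String) : Prop := s ≠ ""
instance (s : String) : Decidable (Pre_SherlockValidString s) := by unfold Pre_SherlockValidString; infer_instance
def pvWitness_SherlockValidString : String := "aabbc"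

def Spec_SherlockValidString (s : String) (out : Bool) : Prop := out = SherlockValidString_alt s
instance (s : String) (out : Bool) : Decidable (Spec_SherlockValidString s out) := by unfold Spec_SherlockValidString; infer_instance

-- ===== CLAIM (what is proved, stated in full; the proofs are below) =====
def Claim_equal_SherlockValidString : Prop := ∀ (s : String), Dom_SherlockValidString s → Pre_SherlockValidString s → Spec_SherlockValidString s (SherlockValidString s)

-- ===== LEMMAS AND PROOFS =====

-- A's all-equal flag loop, characterised
def pvAllSame (L : List Int) : Prop := ∀ x ∈ L, ∀ y ∈ L, x = y

theorem pvBumpA_none_iff (l : List (Char × Int)) (c : Char) :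
    pvBumpA l c = none ↔ (l.any (fun p => p.1 == c)) = false := by
  induction l with
  | nil => simp [pvBumpA]
  | cons p rest ih =>
    obtain ⟨a, n⟩ := p
    by_cases hca : c = a
    · subst hca; simp [pvBumpA]
    · have hb : (c == a) = false := beq_eq_false_iff_ne.mpr hca
      have hb' : (a == c) = false := beq_eq_false_iff_ne.mpr (Ne.symm hca)
      simp [pvBumpA, hb, hb', ih]

theorem pvStep_none (l : List (Char × Int)) (c : Char) (h : pvBumpA l c = none) :
    ((PySem.Dict.mk l).insert c ((PySem.Dict.mk l).getD c 0 + 1)).items = l ++ [(c, 1)] := by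
  have hcon := (pvBumpA_none_iff l c).mp h
  have hfind : l.find? (fun p => p.1 == c) = none := by
    rw [List.find?_eq_none]
    intro p hp
    simp only [List.any_eq_false] at hcon
    simpa using hcon p hp
  simp [PySem.Dict.insert, PySem.Dict.contains, PySem.Dict.getD, PySem.Dict.get?, hcon, hfind]

theorem pvStep_some (l : List (Char × Int)) (c : Char) (S' : List (Char × Int))
    (hnd : (l.map (·.1)).Nodup) (h : pvBumpA l c = some S') :
    ((PySem.Dict.mk l).insert c ((PySem.Dict.mk l).getD c 0 + 1)).items = S' := by
  induction l generalizing S' with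
  | nil => simp [pvBumpA] at h
  | cons p rest ih =>
    obtain ⟨a, n⟩ := p
    simp only [List.map_cons, List.nodup_cons, List.mem_map] at hnd
    obtain ⟨ha, hnd'⟩ := hnd
    by_cases hca : c = a
    · subst hca
      simp only [pvBumpA, beq_self_eq_true, if_pos, Option.some.injEq] at h
      subst h
      simp only [PySem.Dict.insert, PySem.Dict.contains, PySem.Dict.getD, PySem.Dict.get?,
        List.any_cons, beq_self_eq_true, Bool.true_or, if_pos,
        List.find?_cons_of_pos, List.map_cons]
      have hrest : ∀ q ∈ rest, (q.1 == c) = false := by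
        intro q hq
        simp only [beq_eq_false_iff_ne, ne_eq]
        intro hqc; exact ha ⟨q, hq, hqc⟩
      rw [List.map_congr_left (fun q hq => by rw [if_neg (by simp [hrest q hq])])]
      simp [Option.getD]
    · have hb : (c == a) = false := beq_eq_false_iff_ne.mpr hca
      have hb' : (a == c) = false := beq_eq_false_iff_ne.mpr (Ne.symm hca)
      simp only [pvBumpA, hb, Bool.false_eq_true, if_neg, not_false_iff] at h
      cases hr : pvBumpA rest c with
      | none => rw [hr] at h; simp at h
      | some S'' =>
        rw [hr] at h
        simp only [Option.map_some, Option.some.injEq] at h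
        subst h
        have hcon : (rest.any fun p => p.1 == c) = true := by
          cases hh : (rest.any fun p => p.1 == c)
          · rw [← pvBumpA_none_iff] at hh; rw [hh] at hr; cases hr
          · rfl
        have ih' := ih S'' hnd' hr
        simp only [PySem.Dict.insert, PySem.Dict.contains, PySem.Dict.getD, PySem.Dict.get?,
          List.any_cons, hb', hcon, Bool.or_true, if_pos, List.map_cons,
          List.find?_cons_of_neg (p := fun (p : Char × Int) => p.1 == c) (a := (a, n)) (by simp [hb'])] at ih' ⊢
        simp only [Bool.false_eq_true, if_neg, not_false_iff, List.cons.injEq, true_and]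
        exact ih'

theorem pvKeys_insert (d : PySem.Dict Char Int) (k : Char) (v : Int) :
    (d.insert k v).keys = if d.contains k then d.keys else d.keys ++ [k] := by
  by_cases h : d.contains k
  · simp only [PySem.Dict.insert, h, if_pos, PySem.Dict.keys, List.map_map]
    rw [List.map_congr_left]
    intro p _
    by_cases hp : (p.1 == k) = true
    · simp [Function.comp, (beq_iff_eq.mp hp).symm]
    · simp [Function.comp, hp]
  · simp only [PySem.Dict.insert, h, if_neg, Bool.false_eq_true, not_false_iff, PySem.Dict.keys,
      List.map_append, List.map_cons, List.map_nil]

theorem pvNodup_insert (d : PySem.Dict Char Int) (k : Char) (v : Int)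
    (hnd : d.keys.Nodup) : (d.insert k v).keys.Nodup := by
  rw [pvKeys_insert]
  by_cases h : d.contains k
  · simpa [h] using hnd
  · have hk : k ∉ d.keys := by
      intro hmem
      exact h ((PySem.Dict.contains_iff_mem_keys (d := d) (k := k)).mpr hmem)
    simp only [h, Bool.false_eq_true, if_neg, not_false_iff]
    simp only [List.nodup_append, List.nodup_cons]
    refine ⟨hnd, by simp, ?_⟩
    intro a hmem b hb
    simp only [List.mem_singleton] at hb
    subst hb
    intro hab
    exact hk (hab ▸ hmem)

theorem pvLoopA_eq_dict (cs : List Char) (d : PySem.Dict Char Int) (hnd : d.keys.Nodup) :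
    pvLoopA d.items cs = (cs.foldl (fun d c => d.insert c (d.getD c 0 + 1)) d).items := by
  induction cs generalizing d with
  | nil => simp [pvLoopA]
  | cons c cs ih =>
    have hnd' := pvNodup_insert d c (d.getD c 0 + 1) hnd
    cases h : pvBumpA d.items c with
    | some S' =>
      have hs := pvStep_some d.items c S' (by exact hnd) h
      simp only [pvLoopA, h, List.foldl_cons]
      rw [← hs]
      exact ih _ hnd'
    | none =>
      have hs := pvStep_none d.items c h
      simp only [pvLoopA, h, List.foldl_cons]
      rw [← hs]
      exact ih _ hnd'

theorem pvAllEqA_iff (L : List Int) : pvAllEqA L = true ↔ pvAllSame L := by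
  cases L with
  | nil => simp [pvAllEqA, pvAllSame]
  | cons a t =>
    simp only [pvAllEqA, pvAllSame, List.all_eq_true, List.headD_cons, beq_iff_eq]
    constructor
    · intro h x hx y hy
      rw [h x hx, h y hy]
    · intro h x hx
      exact h x hx a (List.mem_cons_self)

theorem pvTryA_iff (L : List Int) (is : List Nat) :
    pvTryA L is = true ↔ ∃ i ∈ is, pvAllEqA (pvDecA L i) = true := by
  induction is with
  | nil => simp [pvTryA]
  | cons i is ih => by_cases h : pvAllEqA (pvDecA L i) = true <;> simp [pvTryA, h, ih]

theorem pvSet_mid (T D : List Int) (v x : Int) : (T ++ v :: D).set T.length x = T ++ x :: D := by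
  rw [List.set_append]; simp

theorem pvErase_mid (T D : List Int) (v : Int) : (T ++ v :: D).eraseIdx T.length = T ++ D := by
  rw [List.eraseIdx_append_of_length_le (by omega)]; simp

theorem pvGetD_mid (T D : List Int) (v : Int) : (T ++ v :: D).getD T.length 0 = v := by
  rw [List.getD_eq_getElem _ _ (by simp)]
  simp

theorem pvDecA_mid (T D : List Int) (v : Int) :
    pvDecA (T ++ v :: D) T.length = if v = 1 then T ++ D else T ++ (v - 1) :: D := by
  unfold pvDecA
  simp only [pvGetD_mid, pvSet_mid]
  by_cases hv : v = 1
  · simp [hv, pvErase_mid]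
  · rw [if_neg (by simp; omega), if_neg hv]

theorem pvDecomp (L : List Int) (i : Nat) (h : i < L.length) :
    L = L.take i ++ L[i] :: L.drop (i + 1) ∧ (L.take i).length = i := by
  constructor
  · conv_lhs => rw [← List.take_append_drop i L]
    rw [List.drop_eq_getElem_cons h]
  · simp; omega

theorem pvAllSame_mid (T D : List Int) (x c : Int) (hx : x = c)
    (hT : ∀ a ∈ T, a = c) (hD : ∀ a ∈ D, a = c) : pvAllSame (T ++ x :: D) := by
  intro p hp q hq
  have h1 : ∀ r ∈ T ++ x :: D, r = c := by
    intro r hr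
    rcases List.mem_append.mp hr with h | h
    · exact hT r h
    · rcases List.mem_cons.mp h with h | h
      · exact h ▸ hx
      · exact hD r h
  rw [h1 p hp, h1 q hq]

-- the core equivalence of the two checks on a nonempty list of positive counts

theorem pvCore (L : List Int) (_hne : L ≠ []) (hpos : ∀ x ∈ L, 1 ≤ x)
    (m M : Int) (hm : PySem.List.min? L (fun x => x) = some m)
    (hM : PySem.List.max? L (fun x => x) = some M) :
    (if pvAllEqA L then true else pvTryA L (List.range L.length)) =
      (if m == M then true
       else if M == m + 1 && (L.count M : Int) == 1 then true
       else m == 1 && (L.count M : Int) == (L.length : Int) - 1) := by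
  have hmMem : m ∈ L := PySem.List.min?_mem hm
  have hMMem : M ∈ L := PySem.List.max?_mem hM
  have hmin : ∀ y ∈ L, m ≤ y := PySem.List.min?_isMin hm
  have hmax : ∀ y ∈ L, y ≤ M := PySem.List.max?_isMax hM
  have hA : (if pvAllEqA L then true else pvTryA L (List.range L.length)) = true ↔
      (pvAllSame L ∨ ∃ i, i < L.length ∧ pvAllSame (pvDecA L i)) := by
    by_cases h : pvAllEqA L = true
    · simp only [h, if_pos]
      simp only [true_iff]
      exact Or.inl ((pvAllEqA_iff L).mp h)
    · rw [if_neg h, pvTryA_iff]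
      constructor
      · rintro ⟨i, hi, hall⟩
        exact Or.inr ⟨i, List.mem_range.mp hi, (pvAllEqA_iff _).mp hall⟩
      · rintro (hall | ⟨i, hi, hall⟩)
        · exact absurd ((pvAllEqA_iff L).mpr hall) h
        · exact ⟨i, List.mem_range.mpr hi, (pvAllEqA_iff _).mpr hall⟩
  have hB : (if m == M then true
       else if M == m + 1 && (L.count M : Int) == 1 then true
       else m == 1 && (L.count M : Int) == (L.length : Int) - 1) = true ↔
      (m = M ∨ (M = m + 1 ∧ (L.count M : Int) = 1) ∨
        (m = 1 ∧ (L.count M : Int) = (L.length : Int) - 1)) := by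
    split_ifs with h1 h2
    · simp at h1; simp [h1]
    · simp only [Bool.and_eq_true, beq_iff_eq] at h2
      constructor
      · intro _; exact Or.inr (Or.inl h2)
      · intro _; rfl
    · simp only [Bool.and_eq_true, beq_iff_eq] at *
      constructor
      · rintro ⟨e1, e2⟩; exact Or.inr (Or.inr ⟨e1, e2⟩)
      · rintro (e | e | e)
        · exact absurd e (by simpa using h1)
        · exact absurd e (by simpa using h2)
        · exact e
  rw [Bool.eq_iff_iff, hA, hB]
  constructor
  · -- A's check succeeds → B's condition
    rintro (hall | ⟨i, hi, hall⟩)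
    · exact Or.inl (hall m hmMem M hMMem)
    · obtain ⟨hL, hiT⟩ := pvDecomp L i hi
      set T := L.take i with hT
      set D := L.drop (i + 1) with hD
      clear_value T D
      set v := L[i] with hv
      have hvL : v ∈ L := List.getElem_mem hi
      clear_value v
      have hvpos : 1 ≤ v := hpos v hvL
      have hall' : pvAllSame (pvDecA (T ++ v :: D) T.length) := by
        rw [hiT, ← hL]; exact hall
      rw [pvDecA_mid] at hall'
      have hmemTD : ∀ a, a ∈ T ∨ a ∈ D → a ∈ L := by
        intro a ha
        rw [hL]
        rcases ha with h | h
        · exact List.mem_append.mpr (Or.inl h)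
        · exact List.mem_append.mpr (Or.inr (List.mem_cons.mpr (Or.inr h)))
      have hmemL : ∀ a ∈ L, a = v ∨ (a ∈ T ∨ a ∈ D) := by
        intro a ha
        rw [hL] at ha
        rcases List.mem_append.mp ha with h | h
        · exact Or.inr (Or.inl h)
        · rcases List.mem_cons.mp h with h | h
          · exact Or.inl h
          · exact Or.inr (Or.inr h)
      have hlen : L.length = T.length + 1 + D.length := by
        rw [hL]; simp only [List.length_append, List.length_cons]; omega
      by_cases hTD : T ++ D = []
      · -- L is the singleton [v]
        have hTn : T = [] := (List.append_eq_nil_iff.mp hTD).1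
        have hDn : D = [] := (List.append_eq_nil_iff.mp hTD).2
        have hsing : ∀ a ∈ L, a = v := by
          intro a ha
          rcases hmemL a ha with h | h | h
          · exact h
          · rw [hTn] at h; cases h
          · rw [hDn] at h; cases h
        exact Or.inl ((hsing m hmMem).trans (hsing M hMMem).symm)
      · obtain ⟨c, hc⟩ := List.exists_mem_of_ne_nil _ hTD
        have hcL : c ∈ L := hmemTD c (List.mem_append.mp hc)
        have hcpos : 1 ≤ c := hpos c hcL
        by_cases hv1 : v = 1
        · rw [if_pos hv1] at hall'
          -- removal case: L = T ++ 1 :: D with T ++ D all equal to c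
          have hTDc : ∀ a, a ∈ T ∨ a ∈ D → a = c := by
            intro a ha
            exact hall' a (List.mem_append.mpr ha) c hc
          by_cases hc1 : c = 1
          · -- everything is 1
            have hsing : ∀ a ∈ L, a = 1 := by
              intro a ha
              rcases hmemL a ha with h | h
              · exact h.trans hv1
              · exact (hTDc a h).trans hc1
            exact Or.inl ((hsing m hmMem).trans (hsing M hMMem).symm)
          · have hc2 : 2 ≤ c := by omega
            have hm1 : m = 1 := by
              have := hmin v hvL
              rcases hmemL m hmMem with h | h
              · omega
              · have := hTDc m h; omega
            have hMc : M = c := by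
              have := hmax c hcL
              rcases hmemL M hMMem with h | h
              · omega
              · exact hTDc M h
            have hcntT : List.count M T = T.length := by
              rw [List.count_eq_length]
              intro b hb
              exact ((hTDc b (Or.inl hb)).trans hMc.symm).symm
            have hcntD : List.count M D = D.length := by
              rw [List.count_eq_length]
              intro b hb
              exact ((hTDc b (Or.inr hb)).trans hMc.symm).symm
            have hMne : (v == M) = false := by
              simp only [beq_eq_false_iff_ne]; omega
            have hcnt : List.count M L = T.length + D.length := by
              rw [hL]
              simp [List.count_append, List.count_cons, hMne, hcntT, hcntD]
            refine Or.inr (Or.inr ⟨hm1, ?_⟩)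
            rw [hcnt, hlen]
            push_cast
            ring
        · -- decrement case: T and D elements all equal v - 1
          rw [if_neg hv1] at hall'
          have hv2 : 2 ≤ v := by omega
          have hsub : (v - 1) ∈ T ++ (v - 1) :: D := List.mem_append.mpr (Or.inr List.mem_cons_self)
          have hTDc : ∀ a, a ∈ T ∨ a ∈ D → a = v - 1 := by
            intro a ha
            refine hall' a ?_ (v - 1) hsub
            rcases ha with h | h
            · exact List.mem_append.mpr (Or.inl h)
            · exact List.mem_append.mpr (Or.inr (List.mem_cons.mpr (Or.inr h)))
          have hcv : c = v - 1 := hTDc c (List.mem_append.mp hc)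
          have hmv : m = v - 1 := by
            have h1 := hmin c hcL
            have h2 := hmin v hvL
            rcases hmemL m hmMem with h | h
            · omega
            · have := hTDc m h; omega
          have hMv : M = v := by
            have h1 := hmax v hvL
            rcases hmemL M hMMem with h | h
            · exact h
            · have := hTDc M h; omega
          have hcntT : List.count M T = 0 := by
            rw [List.count_eq_zero]
            intro hMT
            have := hTDc M (Or.inl hMT); omega
          have hcntD : List.count M D = 0 := by
            rw [List.count_eq_zero]
            intro hMD
            have := hTDc M (Or.inr hMD); omega
          have hMe : (v == M) = true := by simp [hMv]
          have hcnt : List.count M L = 1 := by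
            rw [hL]
            simp [List.count_append, List.count_cons, hMe, hcntT, hcntD]
          exact Or.inr (Or.inl ⟨by omega, by rw [hcnt]; norm_num⟩)
  · -- B's condition → A's check succeeds
    rintro (hmM | ⟨hMm, hcnt⟩ | ⟨hm1, hcnt⟩)
    · refine Or.inl ?_
      intro x hx y hy
      have := hmin x hx; have := hmax x hx
      have := hmin y hy; have := hmax y hy
      omega
    · -- decrement the unique maximum
      obtain ⟨i, hi, hvi⟩ := List.mem_iff_getElem.mp hMMem
      refine Or.inr ⟨i, hi, ?_⟩
      obtain ⟨hL, hiT⟩ := pvDecomp L i hi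
      set T := L.take i with hT
      set D := L.drop (i + 1) with hD
      clear_value T D
      rw [hvi] at hL
      have hMpos : 1 ≤ m := hpos m hmMem
      have hMne1 : ¬ M = 1 := by omega
      have hcnt' : List.count M L = 1 := by exact_mod_cast hcnt
      have hcntTD : List.count M T = 0 ∧ List.count M D = 0 := by
        have : List.count M L = List.count M T + 1 + List.count M D := by
          rw [hL]; simp [List.count_append]
          omega
        omega
      have hnotT : M ∉ T := List.count_eq_zero.mp hcntTD.1
      have hnotD : M ∉ D := List.count_eq_zero.mp hcntTD.2
      have hmemTD : ∀ a, a ∈ T ∨ a ∈ D → a ∈ L := by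
        intro a ha
        rw [hL]
        rcases ha with h | h
        · exact List.mem_append.mpr (Or.inl h)
        · exact List.mem_append.mpr (Or.inr (List.mem_cons.mpr (Or.inr h)))
      have hTDm : ∀ a, a ∈ T ∨ a ∈ D → a = m := by
        intro a ha
        have haL := hmemTD a ha
        have h1 := hmin a haL
        have h2 := hmax a haL
        have : a ≠ M := by
          rintro rfl
          rcases ha with h | h
          · exact hnotT h
          · exact hnotD h
        omega
      rw [hiT.symm, hL, pvDecA_mid, if_neg hMne1]
      exact pvAllSame_mid T D (M - 1) m (by omega) (fun a ha => hTDm a (Or.inl ha))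
        (fun a ha => hTDm a (Or.inr ha))
    · -- remove the unique count-1 character
      by_cases hmM : m = M
      · refine Or.inl ?_
        intro x hx y hy
        have := hmin x hx; have := hmax x hx
        have := hmin y hy; have := hmax y hy
        omega
      · have hmltM : m < M := lt_of_le_of_ne (hmin M hMMem) hmM
        obtain ⟨i, hi, hvi⟩ := List.mem_iff_getElem.mp hmMem
        refine Or.inr ⟨i, hi, ?_⟩
        obtain ⟨hL, hiT⟩ := pvDecomp L i hi
        set T := L.take i with hT
        set D := L.drop (i + 1) with hD
        clear_value T D
        rw [hvi] at hL
        have hlen : L.length = T.length + 1 + D.length := by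
          rw [hL]; simp only [List.length_append, List.length_cons]; omega
        have hMnem : (m == M) = false := by simp only [beq_eq_false_iff_ne]; omega
        have hcntTD : List.count M T + List.count M D = T.length + D.length := by
          have h1 : List.count M L = List.count M T + List.count M D := by
            rw [hL]; simp [List.count_append, List.count_cons, hMnem]
          have h2 : (List.count M L : Int) = (L.length : Int) - 1 := hcnt
          omega
        have hcT : List.count M T = T.length := by
          have := List.count_le_length (l := T) (a := M)
          have := List.count_le_length (l := D) (a := M)
          omega
        have hcD : List.count M D = D.length := by
          have := List.count_le_length (l := T) (a := M)
          have := List.count_le_length (l := D) (a := M)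
          omega
        have hTM := List.count_eq_length.mp hcT
        have hDM := List.count_eq_length.mp hcD
        rw [hiT.symm, hL, pvDecA_mid, if_pos hm1]
        intro x hx y hy
        have hall : ∀ a ∈ T ++ D, a = M := by
          intro a ha
          rcases List.mem_append.mp ha with h | h
          · exact (hTM a h).symm
          · exact (hDM a h).symm
        rw [hall x hx, hall y hy]

-- assembly
theorem SherlockValidString_spec : Claim_equal_SherlockValidString := by
  intro s _ hpre
  unfold Spec_SherlockValidString
  have hne : s.toList ≠ [] := by
    intro h
    exact hpre (by rwa [← String.toList_eq_nil_iff])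
  obtain ⟨c, cs, hcs⟩ : ∃ c cs, s.toList = c :: cs := by
    cases h : s.toList with
    | nil => exact absurd h hne
    | cons c cs => exact ⟨c, cs, rfl⟩
  have h0 : [(c, (1 : Int))] =
      ((PySem.Dict.empty.insert c ((PySem.Dict.empty : PySem.Dict Char Int).getD c 0 + 1))).items := by
    rfl
  have hnd0 : ((PySem.Dict.empty.insert c ((PySem.Dict.empty : PySem.Dict Char Int).getD c 0 + 1))).keys.Nodup := by
    rw [pvKeys_insert]
    simp [PySem.Dict.contains, PySem.Dict.empty, PySem.Dict.keys]
  have hS : pvLoopA [(c, 1)] cs =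
      ((c :: cs).foldl (fun d c => d.insert c (d.getD c 0 + 1)) PySem.Dict.empty).items := by
    rw [h0, pvLoopA_eq_dict cs _ hnd0, List.foldl_cons]
  have hvals' : ((c :: cs).foldl (fun d c => d.insert c (d.getD c 0 + 1))
        (PySem.Dict.empty : PySem.Dict Char Int)).values =
      (PySem.Set.ofList (c :: cs)).map (fun k => ((c :: cs).count k : Int)) := by
    rw [PySem.Dict.foldl_insert_getD_add_one_eq_counter, PySem.Dict.values,
      PySem.Dict.items_counter, List.map_map]
    rfl
  have hvne : ((c :: cs).foldl (fun d c => d.insert c (d.getD c 0 + 1))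
      (PySem.Dict.empty : PySem.Dict Char Int)).values ≠ [] := by
    intro h
    have hc : c ∈ PySem.Set.ofList (c :: cs) := (PySem.Set.mem_ofList _ c).mpr List.mem_cons_self
    rw [hvals'] at h
    rw [List.map_eq_nil_iff.mp h] at hc
    cases hc
  have hvpos : ∀ x ∈ ((c :: cs).foldl (fun d c => d.insert c (d.getD c 0 + 1))
      (PySem.Dict.empty : PySem.Dict Char Int)).values, 1 ≤ x := by
    intro x hx
    rw [hvals'] at hx
    obtain ⟨k, hk, hxe⟩ := List.mem_map.mp hx
    have hkmem : k ∈ c :: cs := (PySem.Set.mem_ofList _ k).mp hk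
    have : 1 ≤ (c :: cs).count k := List.count_pos_iff.mpr hkmem
    omega
  simp only [SherlockValidString, SherlockValidString_alt, hcs]
  rw [hS]
  have hv : ((c :: cs).foldl (fun d c => d.insert c (d.getD c 0 + 1))
      (PySem.Dict.empty : PySem.Dict Char Int)).items.map (·.2) =
      ((c :: cs).foldl (fun d c => d.insert c (d.getD c 0 + 1))
      (PySem.Dict.empty : PySem.Dict Char Int)).values := rfl
  rw [hv]
  obtain ⟨m, hm⟩ : ∃ m, PySem.List.min? ((c :: cs).foldl (fun d c => d.insert c (d.getD c 0 + 1))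
      (PySem.Dict.empty : PySem.Dict Char Int)).values (fun x => x) = some m := by
    cases h : PySem.List.min? ((c :: cs).foldl (fun d c => d.insert c (d.getD c 0 + 1))
        (PySem.Dict.empty : PySem.Dict Char Int)).values (fun x => x) with
    | none => exact absurd ((PySem.List.min?_eq_none_iff _ _).mp h) hvne
    | some m => exact ⟨m, rfl⟩
  obtain ⟨M, hM⟩ : ∃ M, PySem.List.max? ((c :: cs).foldl (fun d c => d.insert c (d.getD c 0 + 1))
      (PySem.Dict.empty : PySem.Dict Char Int)).values (fun x => x) = some M := by
    cases h : PySem.List.max? ((c :: cs).foldl (fun d c => d.insert c (d.getD c 0 + 1))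
        (PySem.Dict.empty : PySem.Dict Char Int)).values (fun x => x) with
    | none => exact absurd ((PySem.List.max?_eq_none_iff _ _).mp h) hvne
    | some M => exact ⟨M, rfl⟩
  simp only [hm, hM]
  exact pvCore _ hvne hvpos m M hm hM
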